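-- pv_equiv track=rewrite | github.com/vrthra/mimid | Cmimid/src/grammartools.py | replace_key_by_key
-- ===== SOURCE A (Python) =====
-- def first_in_chain(token, chain):
--     while True:
--         if token in chain:
--             token = chain[token]
--         else:
--             break
--     return token
--
-- def replace_key_by_key(grammar, keys_to_replace):
--     new_grammar = {}
--     for key in grammar:
--         if key in keys_to_replace: continue
--         new_rules = []
--         for rule in grammar[key]:
--             new_rule = [first_in_chain(token, keys_to_replace) for token in rule]
--             new_rules.append(new_rule)
--         new_grammar[key] = new_rules
--     return new_grammar
-- ===== SOURCE B (Python) =====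
-- def replace_key_by_key(grammar, keys_to_replace):
--     # Stage 1: collapse every substitution chain by repeated squaring of the
--     # key map (path doubling): after enough rounds each key maps directly to
--     # the end of its chain, so no chain is ever walked per token.
--     resolved = dict(keys_to_replace)
--     n = len(resolved)
--     steps = 1
--     while steps <= n:
--         resolved = {k: resolved.get(v, v) for k, v in resolved.items()}
--         steps *= 2
--     # Stage 2: one pass over the grammar, a single dict lookup per token.
--     return {key: [[resolved.get(t, t) for t in rule] for rule in rules]
--             for key, rules in grammar.items() if key not in keys_to_replace}
-- ===== Notes on version B (the rewrite author's own statement) =====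
-- stated objective: alternative
-- what changed: B replaces A's chain walk per token occurrence by a staged algorithm: it first collapses the whole substitution map by repeated squaring (path doubling), then rewrites the grammar in a single pass with one dict lookup per token; Pre_ excludes cyclic substitution chains reachable from a kept rule's token, on which A loops forever (returns nothing).
import Mathlib
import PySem

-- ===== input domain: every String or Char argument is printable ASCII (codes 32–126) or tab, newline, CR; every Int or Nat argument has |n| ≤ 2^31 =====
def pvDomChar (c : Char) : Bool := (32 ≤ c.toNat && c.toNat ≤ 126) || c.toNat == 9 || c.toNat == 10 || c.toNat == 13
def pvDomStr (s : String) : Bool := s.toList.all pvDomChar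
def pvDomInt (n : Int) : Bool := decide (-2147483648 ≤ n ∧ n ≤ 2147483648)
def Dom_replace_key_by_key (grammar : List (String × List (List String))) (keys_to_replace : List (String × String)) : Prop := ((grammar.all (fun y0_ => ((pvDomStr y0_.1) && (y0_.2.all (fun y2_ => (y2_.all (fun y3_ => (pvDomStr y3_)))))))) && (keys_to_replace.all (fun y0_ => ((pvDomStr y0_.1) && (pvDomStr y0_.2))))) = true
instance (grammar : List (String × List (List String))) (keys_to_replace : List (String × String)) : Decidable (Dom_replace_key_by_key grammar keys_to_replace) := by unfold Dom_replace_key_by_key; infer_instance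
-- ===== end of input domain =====

-- B collapses the substitution map once by repeated squaring (path doubling) and then rewrites
-- the grammar with one dict lookup per token, instead of A's chain walk per token occurrence.

-- ===== PORT A =====
-- first_in_chain: 'while True: if token in chain: token = chain[token] else: break'.
-- Fuel keys_to_replace.length + 1 only totalises the loop: on inputs admitted by Pre_ every
-- chain reaches its terminal within chain-size ≤ keys_to_replace.length steps.
def firstInChain (fuel : Nat) (token : String) (chain : PySem.Dict String String) : String :=
  match fuel with
  | 0 => token
  | fuel + 1 =>
    match chain.get? token with
    | some v => firstInChain fuel v chain
    | none => token

def replace_key_by_key (grammar : List (String × List (List String))) (keys_to_replace : List (String × String)) : List (String × List (List String)) :=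
  let chain := PySem.Dict.ofList keys_to_replace
  let gd := PySem.Dict.ofList grammar
  let new_grammar :=
    gd.items.foldl (fun ng p =>
      if chain.contains p.1 then ng
      else
        let new_rules := p.2.foldl (fun rs rule =>
          rs ++ [rule.map (fun token => firstInChain (keys_to_replace.length + 1) token chain)]) []
        ng.insert p.1 new_rules) PySem.Dict.empty
  new_grammar.items

-- ===== PORT B =====
-- one round of 'resolved = {k: resolved.get(v, v) for k, v in resolved.items()}'
def squareRes (r : PySem.Dict String String) : PySem.Dict String String :=
  PySem.Dict.ofList (r.items.map (fun p => (p.1, r.getD p.2 p.2)))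

-- 'while steps <= n: resolved = square(resolved); steps *= 2' (the 0 < steps guard only
-- totalises the loop; steps starts at 1 and doubles, so it is always true)
def doubleLoop (n : Nat) (r : PySem.Dict String String) (steps : Nat) : PySem.Dict String String :=
  if h : steps ≤ n ∧ 0 < steps then doubleLoop n (squareRes r) (steps * 2)
  else r
termination_by n + 1 - steps
decreasing_by omega

-- the final dict comprehension over grammar.items(): keys come from the grammar dict's items,
-- hence are distinct, so the comprehension is insertion of these pairs in order
def replace_key_by_key_alt (grammar : List (String × List (List String))) (keys_to_replace : List (String × String)) : List (String × List (List String)) :=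
  let chain := PySem.Dict.ofList keys_to_replace
  let resolved := doubleLoop chain.size chain 1
  let gd := PySem.Dict.ofList grammar
  (PySem.Dict.ofList
    ((gd.items.filter (fun p => !chain.contains p.1)).map
      (fun p => (p.1, p.2.map (fun rule => rule.map (fun t => resolved.getD t t)))))).items

-- ===== PRECONDITION & SPEC =====
-- token t's substitution chain terminates: after chain.size steps of the chain map it has
-- left the chain's key set (a walk that has not left after chain.size steps is in a cycle)
def resolvableB (chain : PySem.Dict String String) (t : String) : Bool :=
  !chain.contains ((fun s => chain.getD s s)^[chain.size] t)

-- Pre_ excludes exactly the inputs on which Python A loops forever (a token of a kept rule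
-- whose substitution chain is cyclic); A returns no value there.
def Pre_replace_key_by_key (grammar : List (String × List (List String))) (keys_to_replace : List (String × String)) : Prop :=
  ∀ p ∈ (PySem.Dict.ofList grammar).items,
    (PySem.Dict.ofList keys_to_replace).contains p.1 = false →
    ∀ rule ∈ p.2, ∀ t ∈ rule, resolvableB (PySem.Dict.ofList keys_to_replace) t = true
instance (grammar : List (String × List (List String))) (keys_to_replace : List (String × String)) : Decidable (Pre_replace_key_by_key grammar keys_to_replace) := by unfold Pre_replace_key_by_key; infer_instance

def pvWitness_replace_key_by_key : (List (String × List (List String))) × (List (String × String)) :=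
  ([("S", [["a", "b"], []]), ("T", [["S"]])], [("a", "x"), ("x", "y")])

def Spec_replace_key_by_key (grammar : List (String × List (List String))) (keys_to_replace : List (String × String)) (out : List (String × List (List String))) : Prop := out = replace_key_by_key_alt grammar keys_to_replace
instance (grammar : List (String × List (List String))) (keys_to_replace : List (String × String)) (out : List (String × List (List String))) : Decidable (Spec_replace_key_by_key grammar keys_to_replace out) := by unfold Spec_replace_key_by_key; infer_instance

-- ===== CLAIM (what is proved, stated in full; the proofs are below) =====
def Claim_equal_replace_key_by_key : Prop := ∀ (grammar : List (String × List (List String))) (keys_to_replace : List (String × String)), Dom_replace_key_by_key grammar keys_to_replace → Pre_replace_key_by_key grammar keys_to_replace → Spec_replace_key_by_key grammar keys_to_replace (replace_key_by_key grammar keys_to_replace)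

-- ===== LEMMAS AND PROOFS =====

-- the chain map fixes everything outside the key set
theorem chainF_fix (chain : PySem.Dict String String) (t : String)
    (h : chain.contains t = false) : chain.getD t t = t :=
  PySem.Dict.getD_of_not_contains chain t h

theorem iterate_fix (chain : PySem.Dict String String) (t : String)
    (h : chain.contains t = false) (m : Nat) : (fun s => chain.getD s s)^[m] t = t :=
  Function.iterate_fixed (f := fun s => chain.getD s s) (chainF_fix chain t h) m

-- once outside the key set, further iteration changes nothing
theorem iterate_stable (chain : PySem.Dict String String) (t : String) (a b : Nat)
    (h : chain.contains ((fun s => chain.getD s s)^[a] t) = false) (hab : a ≤ b) :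
    (fun s => chain.getD s s)^[b] t = (fun s => chain.getD s s)^[a] t := by
  have : b = (b - a) + a := by omega
  rw [this, Function.iterate_add_apply]
  exact iterate_fix chain _ h _

theorem firstInChain_eq_iterate (chain : PySem.Dict String String) (fuel : Nat) (t : String) :
    firstInChain fuel t chain = (fun s => chain.getD s s)^[fuel] t := by
  induction fuel generalizing t with
  | zero => rfl
  | succ n ih =>
    cases hg : chain.get? t with
    | some v =>
      rw [Function.iterate_succ_apply, PySem.Dict.getD_of_get?_eq_some chain t hg]
      simp only [firstInChain, hg]
      exact ih v
    | none =>
      simp only [firstInChain, hg]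
      exact (Function.iterate_fixed (f := fun s => chain.getD s s)
        (PySem.Dict.getD_of_get?_eq_none chain t hg) (n + 1)).symm

-- the resolved dict after some rounds: same keys as chain, each key mapped m steps along its chain
def InvRes (chain r : PySem.Dict String String) (m : Nat) : Prop :=
  r.keys = chain.keys ∧
  ∀ k, r.get? k = if chain.contains k then some ((fun s => chain.getD s s)^[m] k) else none

theorem InvRes_getD (chain r : PySem.Dict String String) (m : Nat)
    (h : InvRes chain r m) (t : String) : r.getD t t = (fun s => chain.getD s s)^[m] t := by
  by_cases hc : chain.contains t = true
  · exact PySem.Dict.getD_of_get?_eq_some r t ((h.2 t).trans (if_pos hc))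
  · rw [PySem.Dict.getD_of_get?_eq_none r t ((h.2 t).trans (if_neg hc)),
      iterate_fix chain t (by simpa using hc) m]

-- a dict built from an assoc list with distinct keys has exactly that items list
theorem ofList_items_of_nodup {ν : Type} (l : List (String × ν))
    (h : (l.map Prod.fst).Nodup) : (PySem.Dict.ofList l).items = l := by
  have := PySem.Dict.items_foldl_insert_fresh l Prod.fst Prod.snd PySem.Dict.empty
    (fun a _ => PySem.Dict.contains_empty _) h
  simpa [PySem.Dict.ofList, PySem.Dict.update] using this

theorem squareRes_inv (chain r : PySem.Dict String String) (hnd : chain.keys.Nodup) (m : Nat)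
    (h : InvRes chain r m) : InvRes chain (squareRes r) (m + m) := by
  have hrk : r.keys = chain.keys := h.1
  have hrnd : r.keys.Nodup := hrk ▸ hnd
  have hkeys : (r.items.map (fun p => (p.1, r.getD p.2 p.2))).map Prod.fst = r.keys := by
    simp [PySem.Dict.keys, List.map_map, Function.comp_def]
  have hitems : (squareRes r).items = r.items.map (fun p => (p.1, r.getD p.2 p.2)) := by
    unfold squareRes
    exact ofList_items_of_nodup _ (by rw [hkeys]; exact hrnd)
  have hnewkeys : (squareRes r).keys = chain.keys := by
    have h1 : (squareRes r).keys = r.keys := by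
      simp [PySem.Dict.keys, hitems, List.map_map, Function.comp_def]
    rw [h1, hrk]
  refine ⟨hnewkeys, fun k => ?_⟩
  by_cases hc : chain.contains k = true
  · rw [if_pos hc]
    have hk : r.get? k = some ((fun s => chain.getD s s)^[m] k) := (h.2 k).trans (if_pos hc)
    have hmem : (k, (fun s => chain.getD s s)^[m] k) ∈ r.items :=
      PySem.Dict.mem_items_of_get?_eq_some _ hk
    have hmem' : (k, r.getD ((fun s => chain.getD s s)^[m] k) ((fun s => chain.getD s s)^[m] k))
        ∈ (squareRes r).items := by
      rw [hitems]
      exact List.mem_map_of_mem hmem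
    rw [PySem.Dict.get?_of_mem_items _ hmem' (hnewkeys ▸ hnd),
      InvRes_getD chain r m h, ← Function.iterate_add_apply]
  · rw [if_neg hc]
    rw [PySem.Dict.get?_eq_none_iff_not_mem_keys, hnewkeys]
    intro hmem
    exact hc ((PySem.Dict.contains_iff_mem_keys chain k).mpr hmem)

theorem doubleLoop_inv (chain : PySem.Dict String String) (hnd : chain.keys.Nodup) (N : Nat)
    (steps : Nat) (r : PySem.Dict String String) (hpos : 0 < steps)
    (hinv : InvRes chain r steps) :
    ∃ S, N < S ∧ InvRes chain (doubleLoop N r steps) S := by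
  rw [doubleLoop]
  split
  case isTrue hcond =>
    exact doubleLoop_inv chain hnd N (steps * 2) (squareRes r) (by omega)
      (by rw [Nat.mul_two]; exact squareRes_inv chain r hnd steps hinv)
  case isFalse hcond =>
    exact ⟨steps, by omega, hinv⟩
termination_by N + 1 - steps
decreasing_by omega

theorem InvRes_init (chain : PySem.Dict String String) : InvRes chain chain 1 := by
  refine ⟨rfl, fun k => ?_⟩
  by_cases hc : chain.contains k = true
  · rw [if_pos hc]
    cases hg : chain.get? k with
    | none =>
      exact absurd ((PySem.Dict.contains_iff_mem_keys chain k).mp hc)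
        ((PySem.Dict.get?_eq_none_iff_not_mem_keys chain k).mp hg)
    | some v =>
      rw [Function.iterate_one]
      rw [PySem.Dict.getD_of_get?_eq_some chain k hg]
  · rw [if_neg hc, PySem.Dict.get?_eq_none_iff_not_mem_keys]
    intro hmem
    exact hc ((PySem.Dict.contains_iff_mem_keys chain k).mpr hmem)

theorem size_foldl_insert_le (l : List (String × String)) (d : PySem.Dict String String) :
    (l.foldl (fun acc p => acc.insert p.1 p.2) d).size ≤ d.size + l.length := by
  induction l generalizing d with
  | nil => simp
  | cons p rest ih =>
    simp only [List.foldl_cons, List.length_cons]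
    calc (rest.foldl (fun acc p => acc.insert p.1 p.2) (d.insert p.1 p.2)).size
        ≤ (d.insert p.1 p.2).size + rest.length := ih _
      _ ≤ d.size + (rest.length + 1) := by rw [PySem.Dict.size_insert]; split <;> omega

theorem size_ofList_le (l : List (String × String)) :
    (PySem.Dict.ofList l).size ≤ l.length := by
  have := size_foldl_insert_le l PySem.Dict.empty
  simpa [PySem.Dict.ofList, PySem.Dict.update] using this

-- A's fold over fresh distinct keys produces a filter-map of the items
theorem A_fold_items (chain : PySem.Dict String String)
    (f : List (List String) → List (List String))
    (l : List (String × List (List String))) (d : PySem.Dict String (List (List String)))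
    (hfresh : ∀ p ∈ l, d.contains p.1 = false) (hnd : (l.map Prod.fst).Nodup) :
    (l.foldl (fun ng p =>
      if chain.contains p.1 then ng else ng.insert p.1 (f p.2)) d).items =
    d.items ++ (l.filter (fun p => !chain.contains p.1)).map (fun p => (p.1, f p.2)) := by
  induction l generalizing d with
  | nil => simp
  | cons p rest ih =>
    simp only [List.foldl_cons, List.map_cons, List.nodup_cons] at hnd ⊢
    by_cases hc : chain.contains p.1
    · rw [if_pos hc]
      rw [ih d (fun q hq => hfresh q (List.mem_cons_of_mem _ hq)) hnd.2]
      simp [hc]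
    · rw [if_neg hc]
      rw [ih (d.insert p.1 (f p.2)) ?_ hnd.2]
      · rw [PySem.Dict.items_insert_of_not_contains _ _ (hfresh p (List.mem_cons_self))]
        simp [hc]
      · intro q hq
        have hne : q.1 ≠ p.1 := by
          intro he
          exact hnd.1 (he ▸ List.mem_map_of_mem hq)
        simp [PySem.Dict.contains_insert, hne, hfresh q (List.mem_cons_of_mem _ hq)]

-- ===== VERDICT (by name: the statement is the Claim_ definition above) =====
theorem replace_key_by_key_spec : Claim_equal_replace_key_by_key := by
  intro grammar keys_to_replace _ hpre
  unfold Spec_replace_key_by_key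
  simp only [replace_key_by_key, replace_key_by_key_alt]
  have hchnd : (PySem.Dict.ofList keys_to_replace).keys.Nodup :=
    PySem.Dict.nodup_keys_ofList keys_to_replace
  have hgdnd : ((PySem.Dict.ofList grammar).items.map Prod.fst).Nodup := by
    have := PySem.Dict.nodup_keys_ofList (κ := String) (ν := List (List String)) grammar
    simpa [PySem.Dict.keys] using this
  -- A side: a fold over fresh distinct keys appends; rules-fold is a map
  rw [A_fold_items (PySem.Dict.ofList keys_to_replace)
      (fun rs => rs.foldl (fun acc rule =>
        acc ++ [rule.map (fun token => firstInChain (keys_to_replace.length + 1) token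
          (PySem.Dict.ofList keys_to_replace))]) [])
      (PySem.Dict.ofList grammar).items PySem.Dict.empty
      (fun p _ => PySem.Dict.contains_empty _) hgdnd]
  have hemp : (PySem.Dict.empty : PySem.Dict String (List (List String))).items = [] := rfl
  rw [hemp, List.nil_append]
  -- B side: the comprehension's keys are distinct, so its dict has exactly those items
  rw [ofList_items_of_nodup
      (((PySem.Dict.ofList grammar).items.filter
          (fun p => !(PySem.Dict.ofList keys_to_replace).contains p.1)).map
        (fun p => (p.1, p.2.map (fun rule => rule.map (fun t =>
          (doubleLoop (PySem.Dict.ofList keys_to_replace).size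
            (PySem.Dict.ofList keys_to_replace) 1).getD t t)))))
      (by
        have h1 : (((PySem.Dict.ofList grammar).items.filter
            (fun p => !(PySem.Dict.ofList keys_to_replace).contains p.1)).map
          (fun p => (p.1, p.2.map (fun rule => rule.map (fun t =>
            (doubleLoop (PySem.Dict.ofList keys_to_replace).size
              (PySem.Dict.ofList keys_to_replace) 1).getD t t))))).map Prod.fst
            = ((PySem.Dict.ofList grammar).items.filter
              (fun p => !(PySem.Dict.ofList keys_to_replace).contains p.1)).map Prod.fst := by
          simp [List.map_map, Function.comp_def]
        rw [h1]
        exact hgdnd.sublist ((PySem.Dict.ofList grammar).items.filter_sublist.map Prod.fst))]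
  -- resolved collapses every terminating chain
  obtain ⟨S, hSgt, hSinv⟩ := doubleLoop_inv (PySem.Dict.ofList keys_to_replace) hchnd
    (PySem.Dict.ofList keys_to_replace).size 1 (PySem.Dict.ofList keys_to_replace) one_pos
    (InvRes_init (PySem.Dict.ofList keys_to_replace))
  have hsz : (PySem.Dict.ofList keys_to_replace).size ≤ keys_to_replace.length :=
    size_ofList_le keys_to_replace
  -- pointwise equality on the kept entries
  refine List.map_congr_left ?_
  intro p hp
  obtain ⟨hpmem, hpkeep⟩ := List.mem_filter.mp hp
  have hkeep : (PySem.Dict.ofList keys_to_replace).contains p.1 = false := by simpa using hpkeep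
  simp only [Prod.mk.injEq, true_and]
  rw [PySem.List.foldl_append_singleton_eq_map, List.nil_append]
  refine List.map_congr_left ?_
  intro rule hrule
  refine List.map_congr_left ?_
  intro t ht
  have hres : resolvableB (PySem.Dict.ofList keys_to_replace) t = true :=
    hpre p hpmem hkeep rule hrule t ht
  have hterm : (PySem.Dict.ofList keys_to_replace).contains
      ((fun s => (PySem.Dict.ofList keys_to_replace).getD s s)^[(PySem.Dict.ofList keys_to_replace).size] t) = false := by
    simpa [resolvableB] using hres
  rw [firstInChain_eq_iterate, InvRes_getD (PySem.Dict.ofList keys_to_replace) _ S hSinv t,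
    iterate_stable _ t _ S hterm (by omega),
    iterate_stable _ t _ (keys_to_replace.length + 1) hterm (by omega)]
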